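-- pv_equiv track=rewrite | github.com/plawanrath/Leetcode_Python | FunctionExclusiveTimes.py | exclusiveTimes
-- ===== SOURCE A (Python) =====
-- from typing import List
--
-- def exclusiveTimes(n: int, logs: List[str]) -> List[int]:
--     stack = []
--     res = [0] * n
--
--     for funcTime in logs:
--         # Here sometimes you maybe asked what what happens if you're dealing with unicode/ASCII strings
--         # in that scenario you can convert it to ansii before doing the split.
--         # For example: processTime.encode('ascii','ignore').split(':')
--         funcId, eventType, timestamp = funcTime.split(":")
--         if eventType == "start":
--             stack.append([funcId, timestamp])
--         elif eventType == "end":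
--             funcId, startTime = stack.pop()
--             timeSpent = int(timestamp) - int(startTime) + 1 # We add one because the timestamps are inclusive
--             res[int(funcId)] += timeSpent
--
--             # Decrement time for next function in the stack
--             if stack:
--                 nextFunc, _ = stack[-1]
--                 res[int(nextFunc)] -= timeSpent
--     return res
-- ===== SOURCE B (Python) =====
-- from typing import List
--
-- def exclusiveTimes(n: int, logs: List[str]) -> List[int]:
--     # Incremental-interval method: a stack of funcIds and a cursor `prev`;
--     # each event closes the interval [prev, now) and credits it to the running function.
--     res = [0] * n
--     stack = []
--     prev = 0
--     for log in logs:
--         funcId, eventType, timestamp = log.split(":")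
--         t = int(timestamp)
--         if eventType == "start":
--             if stack:
--                 res[stack[-1]] += t - prev
--             stack.append(int(funcId))
--             prev = t
--         else:
--             res[stack.pop()] += t - prev + 1
--             prev = t + 1
--     return res
-- ===== Notes on version B (the rewrite author's own statement) =====
-- stated objective: alternative
-- what changed: B replaces A's span-and-subtract bookkeeping (store (id,startTime) pairs, on each end add the full inclusive span to the popped function and subtract it from the parent) by the incremental-interval method: a stack of bare ids plus a cursor prev, crediting each inter-event interval to the currently running function as it closes.
-- outside the precondition, e.g. on exclusiveTimes(1, ['0:start:0', '0:start:3']): A returns [0], B returns [3]; on exclusiveTimes(1, ['0:start:x']): A returns [0], B raises ValueError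
import Mathlib
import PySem

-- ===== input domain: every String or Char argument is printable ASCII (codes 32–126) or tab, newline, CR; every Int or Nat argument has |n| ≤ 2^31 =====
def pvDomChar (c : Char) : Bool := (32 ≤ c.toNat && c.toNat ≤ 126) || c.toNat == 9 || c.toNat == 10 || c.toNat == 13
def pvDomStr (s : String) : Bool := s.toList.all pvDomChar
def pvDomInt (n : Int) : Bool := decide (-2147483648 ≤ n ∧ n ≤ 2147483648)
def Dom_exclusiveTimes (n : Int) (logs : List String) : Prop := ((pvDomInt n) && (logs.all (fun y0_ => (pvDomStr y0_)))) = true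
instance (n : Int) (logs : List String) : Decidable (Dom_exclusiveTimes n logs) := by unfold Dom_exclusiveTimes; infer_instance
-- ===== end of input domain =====

-- B replaces A's span-and-subtract bookkeeping by the incremental-interval method
-- (stack of bare ids + a cursor `prev`, crediting each inter-event interval as it closes);
-- objective: alternative decomposition, same O(L) cost.

-- shared primitive: Python's `res[i] += v` (negative index from the end; out of range = IndexError,
-- excluded by Pre_; the port leaves the list unchanged there)
def pyAddAt (res : List Int) (i v : Int) : List Int :=
  match PySem.List.pyIdx? res.length i with
  | some k => res.modify k (· + v)
  | none => res

-- ===== PORT A =====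
def stepA (st : List (String × String) × List Int) (log : String) :
    List (String × String) × List Int :=
  match PySem.Str.split? log ":" with
  | some [funcId, eventType, timestamp] =>
    if eventType = "start" then ((funcId, timestamp) :: st.1, st.2)
    else if eventType = "end" then
      match st.1 with
      | (fId, startTime) :: rest =>
        let timeSpent : Int :=
          (PySem.Int.ofStr? timestamp).getD 0 - (PySem.Int.ofStr? startTime).getD 0 + 1
        let res := pyAddAt st.2 ((PySem.Int.ofStr? fId).getD 0) timeSpent
        match rest with
        | (nextFunc, _) :: _ => (rest, pyAddAt res ((PySem.Int.ofStr? nextFunc).getD 0) (-timeSpent))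
        | [] => (rest, res)
      | [] => st          -- Python raises IndexError (pop from empty); outside Pre_
    else st
  | _ => st               -- Python raises ValueError (unpack); outside Pre_

def exclusiveTimes (n : Int) (logs : List String) : List Int :=
  (logs.foldl stepA ([], List.replicate n.toNat 0)).2

-- ===== PORT B =====
def stepB (st : List Int × Int × List Int) (log : String) : List Int × Int × List Int :=
  match PySem.Str.split? log ":" with
  | some [funcId, eventType, timestamp] =>
    let t : Int := (PySem.Int.ofStr? timestamp).getD 0
    if eventType = "start" then
      let res := match st.1 with
        | top :: _ => pyAddAt st.2.2 top (t - st.2.1)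
        | [] => st.2.2
      ((PySem.Int.ofStr? funcId).getD 0 :: st.1, t, res)
    else
      match st.1 with
      | top :: rest => (rest, t + 1, pyAddAt st.2.2 top (t - st.2.1 + 1))
      | [] => st          -- Python raises IndexError; outside Pre_
  | _ => st               -- Python raises ValueError; outside Pre_

def exclusiveTimes_alt (n : Int) (logs : List String) : List Int :=
  (logs.foldl stepB ([], 0, List.replicate n.toNat 0)).2.2

-- ===== PRECONDITION & SPEC =====
def isStart (l : String) : Bool :=
  match PySem.Str.split? l ":" with
  | some [_, ev, _] => ev == "start"
  | _ => false

def isEnd (l : String) : Bool :=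
  match PySem.Str.split? l ":" with
  | some [_, ev, _] => ev == "end"
  | _ => false

def logOk (n : Int) (l : String) : Bool :=
  match PySem.Str.split? l ":" with
  | some [f, ev, ts] =>
    (ev == "start" || ev == "end") &&
    (match PySem.Int.ofStr? f with
     | some i => decide (-n ≤ i ∧ i < n)
     | none => false) &&
    (PySem.Int.ofStr? ts).isSome
  | _ => false

-- Pre_ is the natural domain of the task: each log is "id:start|end:time" with id and time
-- parseable ints and id a valid index into res, and the start/end events are properly nested
-- and balanced. It excludes inputs where A raises (bad format, unparseable int on an end,
-- out-of-range index, pop from empty stack); it also excludes logs with unmatched "start"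
-- events, on which A returns but the exclusive time of a still-running function is an
-- unspecified corner (A reports 0 for it, B counts its elapsed pieces), and logs whose
-- unmatched "start" carries an unparseable field, where B itself raises ValueError.
def Pre_exclusiveTimes (n : Int) (logs : List String) : Prop :=
  logs.all (logOk n) = true ∧
  (∀ k ≤ logs.length, (logs.take k).countP isEnd ≤ (logs.take k).countP isStart) ∧
  logs.countP isEnd = logs.countP isStart

instance (n : Int) (logs : List String) : Decidable (Pre_exclusiveTimes n logs) := by
  unfold Pre_exclusiveTimes; infer_instance

def pvWitness_exclusiveTimes : Int × List String := (2, ["0:start:0", "1:start:2", "1:end:5", "0:end:6"])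

def Spec_exclusiveTimes (n : Int) (logs : List String) (out : List Int) : Prop := out = exclusiveTimes_alt n logs
instance (n : Int) (logs : List String) (out : List Int) : Decidable (Spec_exclusiveTimes n logs out) := by unfold Spec_exclusiveTimes; infer_instance

-- ===== CLAIM (what is proved, stated in full; the proofs are below) =====
def Claim_equal_exclusiveTimes : Prop := ∀ (n : Int) (logs : List String), Dom_exclusiveTimes n logs → Pre_exclusiveTimes n logs → Spec_exclusiveTimes n logs (exclusiveTimes n logs)

-- ===== LEMMAS AND PROOFS =====

-- well-formedness of one log, as the proofs use it
def Wf (l : String) : Prop :=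
  ∃ f ts, PySem.Str.split? l ":" = some [f, "start", ts] ∨
          PySem.Str.split? l ":" = some [f, "end", ts]

lemma wf_of_logOk {n : Int} {l : String} (h : logOk n l = true) : Wf l := by
  unfold logOk at h
  split at h
  · next f ev ts heq =>
    simp only [Bool.and_eq_true, Bool.or_eq_true, beq_iff_eq] at h
    rcases h.1.1 with h' | h' <;> exact ⟨f, ts, by subst h'; simp [heq]⟩
  · exact absurd h (by simp)

lemma modify_add_comm (r : List Int) (k k' : Nat) (a b : Int) :
    (r.modify k (· + a)).modify k' (· + b) = (r.modify k' (· + b)).modify k (· + a) := by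
  apply List.ext_getElem?
  intro m
  simp only [List.getElem?_modify]
  rcases r[m]? with _ | x
  · rfl
  · show some _ = some _
    congr 1
    split_ifs <;> ring

lemma modify_add_add (r : List Int) (k : Nat) (a b : Int) :
    (r.modify k (· + a)).modify k (· + b) = r.modify k (· + (a + b)) := by
  apply List.ext_getElem?
  intro m
  simp only [List.getElem?_modify]
  rcases r[m]? with _ | x
  · rfl
  · show some _ = some _
    congr 1
    split_ifs <;> ring

lemma pyAddAt_comm (r : List Int) (i j a b : Int) :
    pyAddAt (pyAddAt r i a) j b = pyAddAt (pyAddAt r j b) i a := by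
  cases hi : PySem.List.pyIdx? r.length i <;> cases hj : PySem.List.pyIdx? r.length j <;>
    simp only [pyAddAt, List.length_modify, hi, hj]
  apply modify_add_comm

lemma pyAddAt_add (r : List Int) (i a b : Int) :
    pyAddAt (pyAddAt r i a) i b = pyAddAt r i (a + b) := by
  cases hi : PySem.List.pyIdx? r.length i <;>
    simp only [pyAddAt, List.length_modify, hi]
  apply modify_add_add

lemma pyAddAt_zero (r : List Int) (i : Int) : pyAddAt r i 0 = r := by
  cases hi : PySem.List.pyIdx? r.length i <;> simp only [pyAddAt, hi]
  apply List.ext_getElem?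
  intro m
  simp [List.getElem?_modify]

-- parsed function id
def pid (f : String) : Int := (PySem.Int.ofStr? f).getD 0

-- the pieces B has already credited for the functions still on A's stack
def credits : List (String × String) → Int → List Int → List Int
  | [], _, res => res
  | (f, s) :: rest, prev, res =>
    credits rest ((PySem.Int.ofStr? s).getD 0)
      (pyAddAt res (pid f) (prev - (PySem.Int.ofStr? s).getD 0))

lemma credits_pyAddAt (stk : List (String × String)) (p : Int) (r : List Int) (i a : Int) :
    credits stk p (pyAddAt r i a) = pyAddAt (credits stk p r) i a := by
  induction stk generalizing p r with
  | nil => rfl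
  | cons hd tl ih =>
    obtain ⟨f, s⟩ := hd
    simp only [credits]
    rw [pyAddAt_comm, ih]

lemma four_adds (C : List Int) (gv hv prev sv uv t : Int) :
    pyAddAt (pyAddAt (pyAddAt C gv (prev - sv)) hv (sv - uv)) gv (t - prev + 1)
      = pyAddAt (pyAddAt (pyAddAt C gv (t - sv + 1)) hv (-(t - sv + 1))) hv (t + 1 - uv) := by
  have e1 : sv - uv = -(t - sv + 1) + (t + 1 - uv) := by ring
  have e2 : t - sv + 1 = prev - sv + (t - prev + 1) := by ring
  cases hg : PySem.List.pyIdx? C.length gv with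
  | none =>
    cases hh : PySem.List.pyIdx? C.length hv with
    | none => simp only [pyAddAt, hg, hh]
    | some kh =>
      simp only [pyAddAt, List.length_modify, hg, hh]
      rw [modify_add_add, e1]
  | some kg =>
    cases hh : PySem.List.pyIdx? C.length hv with
    | none =>
      simp only [pyAddAt, List.length_modify, hg, hh]
      rw [modify_add_add, e2]
    | some kh =>
      simp only [pyAddAt, List.length_modify, hg, hh]
      rw [modify_add_add, modify_add_comm C kg kh (prev - sv) (sv - uv), modify_add_add,
        modify_add_comm C kg kh (t - sv + 1) (-(t - sv + 1) + (t + 1 - uv)), e1, e2]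

-- one step of B simulates one step of A
lemma step_sim (l : String) (h : Wf l) (stA : List (String × String)) (resA : List Int)
    (prev : Int) : ∃ p',
    stepB (stA.map (fun q => pid q.1), prev, credits stA prev resA) l =
      ((stepA (stA, resA) l).1.map (fun q => pid q.1), p',
        credits (stepA (stA, resA) l).1 p' (stepA (stA, resA) l).2) := by
  obtain ⟨f, ts, hsp | hsp⟩ := h
  · -- start
    refine ⟨(PySem.Int.ofStr? ts).getD 0, ?_⟩
    cases stA with
    | nil => simp [stepA, stepB, hsp, credits, pid, pyAddAt_zero]
    | cons hd tl =>
      obtain ⟨g, s⟩ := hd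
      simp only [stepA, stepB, hsp]
      norm_num
      simp only [credits, pid, credits_pyAddAt]
      rw [pyAddAt_add, sub_self, pyAddAt_zero]
      refine ⟨trivial, ?_⟩
      congr 1
      ring
  · -- end
    cases stA with
    | nil =>
      refine ⟨prev, ?_⟩
      simp [stepA, stepB, hsp, credits]
    | cons hd tl =>
      obtain ⟨g, s⟩ := hd
      refine ⟨(PySem.Int.ofStr? ts).getD 0 + 1, ?_⟩
      cases tl with
      | nil =>
        simp only [stepA, stepB, hsp, List.map_cons,
          if_neg (show ¬(("end" : String) = "start") from by decide), if_true,
          credits, pid]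
        rw [pyAddAt_add]
        simp only [Prod.mk.injEq, true_and]
        congr 1
        ring
      | cons hd2 tl2 =>
        obtain ⟨h2, u⟩ := hd2
        simp only [stepA, stepB, hsp, List.map_cons,
          if_neg (show ¬(("end" : String) = "start") from by decide), if_true,
          credits, pid]
        simp only [credits_pyAddAt, Prod.mk.injEq, true_and]
        exact four_adds (credits tl2 ((PySem.Int.ofStr? u).getD 0) resA)
          ((PySem.Int.ofStr? g).getD 0) ((PySem.Int.ofStr? h2).getD 0) prev
          ((PySem.Int.ofStr? s).getD 0) ((PySem.Int.ofStr? u).getD 0)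
          ((PySem.Int.ofStr? ts).getD 0)

-- the full simulation invariant
lemma sim (logs : List String) : ∀ (stA : List (String × String)) (resA : List Int) (prev : Int),
    (∀ l ∈ logs, Wf l) →
    ∃ p', logs.foldl stepB (stA.map (fun q => pid q.1), prev, credits stA prev resA) =
      ((logs.foldl stepA (stA, resA)).1.map (fun q => pid q.1), p',
        credits (logs.foldl stepA (stA, resA)).1 p' (logs.foldl stepA (stA, resA)).2) := by
  induction logs with
  | nil => exact fun stA resA prev _ => ⟨prev, rfl⟩
  | cons l ls ih =>
    intro stA resA prev hwf
    obtain ⟨p1, h1⟩ := step_sim l (hwf l (by simp)) stA resA prev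
    obtain ⟨p2, h2⟩ := ih (stepA (stA, resA) l).1 (stepA (stA, resA) l).2 p1
      (fun x hx => hwf x (by simp [hx]))
    refine ⟨p2, ?_⟩
    simp only [List.foldl_cons, h1]
    simpa using h2

-- nesting balance, recursive form used by the induction
def Bal : Nat → List String → Prop
  | d, [] => d = 0
  | d, l :: ls => if isEnd l = true then 0 < d ∧ Bal (d - 1) ls else Bal (d + 1) ls

lemma isStart_of_wf_start {l f ts} (h : PySem.Str.split? l ":" = some [f, "start", ts]) :
    isStart l = true ∧ isEnd l = false := by simp [isStart, isEnd, h]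

lemma isEnd_of_wf_end {l f ts} (h : PySem.Str.split? l ":" = some [f, "end", ts]) :
    isStart l = false ∧ isEnd l = true := by simp [isStart, isEnd, h]

-- the prefix-count formulation of Pre_ gives the recursive balance predicate
lemma counts_bal (logs : List String) : ∀ d : Nat, (∀ l ∈ logs, Wf l) →
    (∀ k ≤ logs.length, (logs.take k).countP isEnd ≤ d + (logs.take k).countP isStart) →
    logs.countP isEnd = d + logs.countP isStart → Bal d logs := by
  induction logs with
  | nil => intro d _ _ htot; simpa [Bal] using htot.symm
  | cons l ls ih =>
    intro d hwf hpre htot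
    obtain ⟨f, ts, hsp | hsp⟩ := hwf l (by simp)
    · -- start
      obtain ⟨hS, hE⟩ := isStart_of_wf_start hsp
      simp [Bal, hE]
      refine ih (d + 1) (fun x hx => hwf x (by simp [hx])) (fun k hk => ?_) ?_
      · have h1 := hpre (k + 1) (by simp; omega)
        simp [List.take_succ_cons, hS, hE] at h1
        omega
      · have h2 := htot
        simp [hS, hE] at h2
        omega
    · -- end
      obtain ⟨hS, hE⟩ := isEnd_of_wf_end hsp
      have hd : 0 < d := by
        have h1 := hpre 1 (by simp)
        simpa [List.countP_cons, hS, hE] using h1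
      simp [Bal, hE]
      refine ⟨hd, ih (d - 1) (fun x hx => hwf x (by simp [hx])) (fun k hk => ?_) ?_⟩
      · have h1 := hpre (k + 1) (by simp; omega)
        simp [List.take_succ_cons, hS, hE] at h1
        omega
      · have h2 := htot
        simp [hS, hE] at h2
        omega

-- with balanced, well-formed logs A's stack is empty at the end
lemma stackA_empty (logs : List String) : ∀ (stA : List (String × String)) (resA : List Int),
    (∀ l ∈ logs, Wf l) → Bal stA.length logs → (logs.foldl stepA (stA, resA)).1 = [] := by
  induction logs with
  | nil =>
    intro stA resA _ hb
    simpa using List.length_eq_zero_iff.mp hb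
  | cons l ls ih =>
    intro stA resA hwf hb
    obtain ⟨f, ts, hsp | hsp⟩ := hwf l (by simp)
    · -- start
      obtain ⟨_, hE⟩ := isStart_of_wf_start hsp
      simp only [Bal, hE] at hb
      rw [if_neg (by simp)] at hb
      simp only [List.foldl_cons, stepA, hsp]
      norm_num
      exact ih _ _ (fun x hx => hwf x (by simp [hx])) (by simpa using hb)
    · -- end
      obtain ⟨_, hE⟩ := isEnd_of_wf_end hsp
      simp only [Bal, hE] at hb
      norm_num at hb
      obtain ⟨hd, hb⟩ := hb
      cases stA with
      | nil => simp at hd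
      | cons hd1 tl =>
        obtain ⟨g, s⟩ := hd1
        have hb' : Bal tl.length ls := by simpa using hb
        have hwf' : ∀ x ∈ ls, Wf x := fun x hx => hwf x (by simp [hx])
        cases tl with
        | nil =>
          simp only [List.foldl_cons, stepA, hsp]
          norm_num
          exact ih _ _ hwf' hb'
        | cons hd2 tl2 =>
          obtain ⟨h2, u⟩ := hd2
          simp only [List.foldl_cons, stepA, hsp]
          norm_num
          exact ih _ _ hwf' hb'

-- ===== VERDICT (by name: the statement is the Claim_ definition above) =====
theorem exclusiveTimes_spec : Claim_equal_exclusiveTimes := by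
  intro n logs _ hpre
  obtain ⟨hok, hpref, htot⟩ := hpre
  have hwf : ∀ l ∈ logs, Wf l := by
    intro l hl
    exact wf_of_logOk (by exact List.all_eq_true.mp hok l hl)
  unfold Spec_exclusiveTimes exclusiveTimes exclusiveTimes_alt
  obtain ⟨p', hB⟩ := sim logs [] (List.replicate n.toNat 0) 0 hwf
  have hempty : (logs.foldl stepA ([], List.replicate n.toNat 0)).1 = [] :=
    stackA_empty logs [] (List.replicate n.toNat 0) hwf
      (counts_bal logs 0 hwf (by simpa using hpref) (by simpa using htot))
  simp only [List.map_nil, credits] at hB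
  rw [hB, hempty]
  rfl
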